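-- pv_equiv track=rewrite | github.com/AIB001/PRISM | prism/fep/modeling/leg_writer.py | _remove_top_level_atomtypes_block
-- ===== SOURCE A (Python) =====
-- def _remove_top_level_atomtypes_block(content: str) -> str:
--     """Remove a standalone top-level [ atomtypes ] block from a copied topology."""
--     lines = content.splitlines()
--     cleaned = []
--     in_atomtypes = False
--
--     for line in lines:
--         stripped = line.strip().lower()
--         if stripped == "[ atomtypes ]":
--             in_atomtypes = True
--             continue
--         if in_atomtypes and (
--             stripped.startswith("#include") or (stripped.startswith("[") and stripped != "[ atomtypes ]")
--         ):
--             in_atomtypes = False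
--             cleaned.append(line)
--             continue
--         if in_atomtypes:
--             continue
--         cleaned.append(line)
--
--     return "\n".join(cleaned).rstrip() + "\n"
-- ===== SOURCE B (Python) =====
-- def _remove_top_level_atomtypes_block(content: str) -> str:
--     """Remove a standalone top-level [ atomtypes ] block: group lines into blocks, then drop atomtypes blocks."""
--     def is_boundary(line):
--         s = line.strip().lower()
--         return s.startswith("[") or s.startswith("#include")
--
--     blocks = []
--     current = []
--     for line in content.splitlines():
--         if is_boundary(line):
--             blocks.append(current)
--             current = [line]
--         else:
--             current.append(line)
--     blocks.append(current)
--
--     kept = []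
--     for block in blocks:
--         if not (block and block[0].strip().lower() == "[ atomtypes ]"):
--             kept.extend(block)
--     return "\n".join(kept).rstrip() + "\n"
-- ===== Notes on version B (the rewrite author's own statement) =====
-- stated objective: alternative
-- what changed: Replaced the single-pass flag-driven line filter with a two-pass decomposition: first partition the lines into blocks at boundary lines (stripped-lowercased starting with '[' or '#include'), then keep every block whose leading line is not '[ atomtypes ]' and join.
import Mathlib
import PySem

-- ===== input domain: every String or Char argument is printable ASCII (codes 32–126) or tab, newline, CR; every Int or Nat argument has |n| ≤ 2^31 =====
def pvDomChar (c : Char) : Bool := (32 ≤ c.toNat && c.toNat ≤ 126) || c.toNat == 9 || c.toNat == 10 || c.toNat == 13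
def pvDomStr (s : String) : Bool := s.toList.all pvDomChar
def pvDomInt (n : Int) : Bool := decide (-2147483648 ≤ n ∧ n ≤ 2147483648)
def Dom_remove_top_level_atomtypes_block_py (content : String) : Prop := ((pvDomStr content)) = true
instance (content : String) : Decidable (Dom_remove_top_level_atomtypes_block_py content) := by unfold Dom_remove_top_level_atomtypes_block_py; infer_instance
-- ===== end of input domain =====

-- B replaces A's single-pass flag-driven line filter by a build-blocks-then-filter decomposition (alternative, same cost).


-- ===== PORT A =====
-- line.strip().lower()
def pvStripLower (line : List Char) : List Char := PySem.Chars.lower (PySem.Chars.strip line)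

def pvAtomtypes : List Char := "[ atomtypes ]".toList

-- A's loop: structural recursion over the lines with the in_atomtypes flag as state,
-- branches in the same order as the Python.
def pvAGo : List (List Char) → Bool → List (List Char)
  | [], _ => []
  | line :: rest, inAt =>
    let stripped := pvStripLower line
    if stripped == pvAtomtypes then
      pvAGo rest true
    else if inAt && (PySem.Chars.startswith stripped "#include".toList
                     || (PySem.Chars.startswith stripped "[".toList && !(stripped == pvAtomtypes))) then
      line :: pvAGo rest false
    else if inAt then
      pvAGo rest inAt
    else
      line :: pvAGo rest inAt

def remove_top_level_atomtypes_block_py (content : String) : String :=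
  String.ofList (PySem.Chars.rstrip
    (PySem.Chars.join "\n".toList (pvAGo (PySem.Chars.splitlines content.toList) false)) ++ "\n".toList)

-- ===== PORT B =====
def pvIsBoundary (line : List Char) : Bool :=
  PySem.Chars.startswith (pvStripLower line) "[".toList
  || PySem.Chars.startswith (pvStripLower line) "#include".toList

-- first pass of B: partition the lines into blocks, a new block at every boundary line
def pvMkBlocks : List (List Char) → List (List Char) → List (List (List Char))
  | [], current => [current]
  | line :: rest, current =>
    if pvIsBoundary line then current :: pvMkBlocks rest [line]
    else pvMkBlocks rest (current ++ [line])

def pvKeepBlock : List (List Char) → Bool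
  | [] => true
  | h :: _ => !(pvStripLower h == pvAtomtypes)

def remove_top_level_atomtypes_block_py_alt (content : String) : String :=
  let blocks := pvMkBlocks (PySem.Chars.splitlines content.toList) []
  let kept := blocks.foldl (fun acc b => if pvKeepBlock b then acc ++ b else acc) []
  String.ofList (PySem.Chars.rstrip (PySem.Chars.join "\n".toList kept) ++ "\n".toList)

-- ===== PRECONDITION & SPEC =====
def Spec_remove_top_level_atomtypes_block_py (content : String) (out : String) : Prop := out = remove_top_level_atomtypes_block_py_alt content
instance (content : String) (out : String) : Decidable (Spec_remove_top_level_atomtypes_block_py content out) := by unfold Spec_remove_top_level_atomtypes_block_py; infer_instance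

-- ===== CLAIM (what is proved, stated in full; the proofs are below) =====
def Claim_equal_remove_top_level_atomtypes_block_py : Prop := ∀ (content : String), Dom_remove_top_level_atomtypes_block_py content → Spec_remove_top_level_atomtypes_block_py content (remove_top_level_atomtypes_block_py content)

-- ===== LEMMAS AND PROOFS =====

-- B's second loop (kept.extend over the blocks) as filter-then-flatten
theorem pvFoldl_keep (bs : List (List (List Char))) (acc : List (List Char)) :
    bs.foldl (fun acc b => if pvKeepBlock b then acc ++ b else acc) acc
      = acc ++ (bs.filter pvKeepBlock).flatten := by
  induction bs generalizing acc with
  | nil => simp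
  | cons b bs ih =>
    simp only [List.foldl_cons, List.filter_cons]
    by_cases h : pvKeepBlock b <;> simp [h, ih, List.append_assoc]

-- a non-boundary line cannot strip-lower to "[ atomtypes ]"
theorem pvNotBoundary_ne (line : List Char) (h : pvIsBoundary line = false) :
    (pvStripLower line == pvAtomtypes) = false := by
  cases heq : (pvStripLower line == pvAtomtypes) with
  | false => rfl
  | true =>
    unfold pvIsBoundary at h
    rw [beq_iff_eq.mp heq] at h
    exact absurd h (by decide)

-- core correspondence: filtered flattened blocks = A's loop, with the flag
-- mirroring whether the block in progress is a dropped one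
theorem pvCore (lines : List (List Char)) (current : List (List Char)) :
    ((pvMkBlocks lines current).filter pvKeepBlock).flatten
      = (if pvKeepBlock current then current else []) ++ pvAGo lines (!pvKeepBlock current) := by
  induction lines generalizing current with
  | nil =>
    by_cases h : pvKeepBlock current <;> simp [pvMkBlocks, pvAGo, h]
  | cons line rest ih =>
    by_cases hb : pvIsBoundary line = true
    · -- boundary line: current block is closed, new block [line] starts
      simp only [pvMkBlocks, hb, if_pos, List.filter_cons]
      by_cases hatom : (pvStripLower line == pvAtomtypes) = true
      · have hkeep : pvKeepBlock [line] = false := by simp [pvKeepBlock, hatom]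
        have hih := ih [line]
        rw [hkeep] at hih
        rw [if_neg (by decide), Bool.not_false] at hih
        simp only [List.nil_append] at hih
        have hgo : ∀ b, pvAGo (line :: rest) b = pvAGo rest true := by
          intro b
          simp only [pvAGo, hatom, if_pos]
        by_cases h : pvKeepBlock current <;>
          simp [h, hih, hgo]
      · have hatom' : (pvStripLower line == pvAtomtypes) = false := by
          simpa using hatom
        have hkeep : pvKeepBlock [line] = true := by simp [pvKeepBlock, hatom']
        have hih := ih [line]
        rw [hkeep] at hih
        rw [if_pos rfl, Bool.not_true] at hih
        have hgo : ∀ b, pvAGo (line :: rest) b = line :: pvAGo rest false := by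
          intro b
          cases b with
          | false => simp [pvAGo, hatom']
          | true =>
            unfold pvIsBoundary at hb
            rw [Bool.or_comm] at hb
            simp only [pvAGo, hatom', Bool.true_and, Bool.not_false, Bool.and_true]
            rw [hb]
            simp
        by_cases h : pvKeepBlock current <;>
          simp [h, hih, hgo]
    · -- non-boundary line: it is appended to the current block
      have hb' : pvIsBoundary line = false := by simpa using hb
      have hatom' : (pvStripLower line == pvAtomtypes) = false := pvNotBoundary_ne line hb'
      simp only [pvMkBlocks, hb', Bool.false_eq_true, ite_false]
      have hkeep : pvKeepBlock (current ++ [line]) = pvKeepBlock current := by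
        cases current with
        | nil => simp [pvKeepBlock, hatom']
        | cons h t => simp [pvKeepBlock]
      have hih := ih (current ++ [line])
      rw [hkeep] at hih
      have hbf : (PySem.Chars.startswith (pvStripLower line) "[".toList = false)
          ∧ (PySem.Chars.startswith (pvStripLower line) "#include".toList = false) := by
        unfold pvIsBoundary at hb'
        exact Bool.or_eq_false_iff.mp hb'
      by_cases h : pvKeepBlock current
      · -- outside a dropped block: the line is kept by both
        have hgo : pvAGo (line :: rest) false = line :: pvAGo rest false := by
          simp only [pvAGo, hatom', Bool.false_and, Bool.false_eq_true, ite_false]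
        rw [hih]
        simp [h, hgo]
      · -- inside a dropped block: the line is dropped by both
        have hgo : pvAGo (line :: rest) true = pvAGo rest true := by
          simp only [pvAGo, hatom', hbf.1, hbf.2, Bool.and_false, Bool.false_and,
            Bool.or_false, Bool.false_eq_true, ite_false, ite_true]
        rw [hih]
        simp [h, hgo]

-- ===== VERDICT (by name: the statement is the Claim_ definition above) =====
theorem remove_top_level_atomtypes_block_py_spec : Claim_equal_remove_top_level_atomtypes_block_py := by
  intro content _
  unfold Spec_remove_top_level_atomtypes_block_py
  unfold remove_top_level_atomtypes_block_py remove_top_level_atomtypes_block_py_alt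
  have h := pvCore (PySem.Chars.splitlines content.toList) []
  rw [show pvKeepBlock [] = true from rfl, if_pos rfl, Bool.not_true, List.nil_append] at h
  simp only [pvFoldl_keep, List.nil_append, h]
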